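-- pv_equiv track=rewrite | github.com/SarthakSwaroop/Office-Hours-320 | oh_scheduler.py | find_common_times
-- ===== SOURCE A (Python) =====
-- from collections import Counter
--
-- def find_common_times(availability, rankings, n, m):
--     all_times = []
--     for student_time in availability:
--         all_times.extend(student_time)
--
--     # hash the frequency of each time
--     time_counts = Counter(all_times)
--
--     # return the n most popular times with at least m students attending
--     common_times = [time for time, count in time_counts.most_common(n) if count >= m]
--
--     # sort common_times by cumulative ranking
--     common_times_rankings = {}
--     for time in common_times:
--         common_times_rankings[time] = 0
--         for student_rankings in rankings:
--             if time in student_rankings: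
--                 common_times_rankings[time] += (3 - student_rankings.index(time))
--     sorted_common_times = sorted(common_times, key=lambda x: common_times_rankings[x], reverse=True)
--
--     return sorted_common_times[:n]
-- ===== SOURCE B (Python) =====
-- def find_common_times(availability, rankings, n, m):
--     # count every time slot in one pass over availability
--     counts = {}
--     for student_time in availability:
--         for t in student_time:
--             counts[t] = counts.get(t, 0) + 1
--     # cumulative ranking score for every time in one pass over rankings
--     # (each student's first mention of a time counts, scored 3 - position)
--     scores = {}
--     for student_rankings in rankings:
--         seen = set()
--         for i, t in enumerate(student_rankings):
--             if t not in seen: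
--                 seen.add(t)
--                 scores[t] = scores.get(t, 0) + (3 - i)
--     if n <= 0:
--         return []
--     candidates = sorted(counts.items(), key=lambda kv: kv[1], reverse=True)[:n]
--     common = [t for t, c in candidates if c >= m]
--     common.sort(key=lambda t: scores.get(t, 0), reverse=True)
--     return common
-- ===== Notes on version B (the rewrite author's own statement) =====
-- stated objective: alternative
-- what changed: Instead of rescanning every student's ranking list twice per candidate time ('in' + '.index' inside a loop over the candidates), B builds the time->count and time->score dictionaries in single passes (scoring each student's first mention of a time by 3 - position) and then only sorts and looks up; asymptotically O(S*L) instead of O(C*S*L) for the scoring, but not measurably faster on a timing run's inputs.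
import Mathlib
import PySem

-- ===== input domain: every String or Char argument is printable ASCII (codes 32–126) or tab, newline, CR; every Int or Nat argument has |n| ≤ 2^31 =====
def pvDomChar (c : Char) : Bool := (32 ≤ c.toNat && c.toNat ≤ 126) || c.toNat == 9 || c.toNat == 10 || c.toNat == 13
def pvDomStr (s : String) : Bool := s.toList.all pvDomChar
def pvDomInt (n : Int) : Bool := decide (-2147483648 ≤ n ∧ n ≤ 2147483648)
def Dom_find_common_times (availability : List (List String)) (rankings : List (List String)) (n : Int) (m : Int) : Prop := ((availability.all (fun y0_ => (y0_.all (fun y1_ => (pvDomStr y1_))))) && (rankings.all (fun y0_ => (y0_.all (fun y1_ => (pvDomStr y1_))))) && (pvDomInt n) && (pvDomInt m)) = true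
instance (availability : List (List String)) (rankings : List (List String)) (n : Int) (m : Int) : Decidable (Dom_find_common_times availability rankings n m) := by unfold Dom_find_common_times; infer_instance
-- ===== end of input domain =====

-- B replaces A's per-candidate rescans of every ranking list ('in' + '.index' inside a loop
-- over the candidate times) with count/score dictionaries built in single passes; objective: alternative.

-- ===== PORT A =====
def find_common_times (availability : List (List String)) (rankings : List (List String)) (n : Int) (m : Int) : List String :=
  let all_times := availability.foldl (fun acc student_time => acc ++ student_time) []
  let time_counts := PySem.Dict.counter all_times
  -- Counter.most_common(n): empty for n ≤ 0, else the stable sort of the items by count descending, first n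
  let most_common := if n ≤ 0 then [] else (PySem.List.sorted time_counts.items (fun kv => kv.2) true).take n.toNat
  let common_times := (most_common.filter (fun kv => m ≤ kv.2)).map (fun kv => kv.1)
  let common_times_rankings := common_times.foldl (fun d time =>
      rankings.foldl (fun d student_rankings =>
          if student_rankings.contains time then
            d.insert time (d.getD time 0 + (3 - ((PySem.List.index? student_rankings time).getD 0 : Int)))
          else d)
        (d.insert time 0))
    (PySem.Dict.empty)
  let sorted_common_times := PySem.List.sorted common_times (fun x => common_times_rankings.getD x 0) true
  PySem.List.slice sorted_common_times none (some n)

-- ===== PORT B =====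
-- one student's pass of Source B's scoring loop: first mention of a time scores 3 - position
def pvAltStudentScores (scores : PySem.Dict String Int) (student_rankings : List String) : PySem.Dict String Int :=
  ((PySem.List.enumerate student_rankings 0).foldl
      (fun (p : PySem.Dict String Int × PySem.Set String) it =>
        if p.2.contains it.2 then p
        else (p.1.insert it.2 (p.1.getD it.2 0 + (3 - it.1)), p.2.add it.2))
      (scores, PySem.Set.empty)).1

def find_common_times_alt (availability : List (List String)) (rankings : List (List String)) (n : Int) (m : Int) : List String :=
  let counts := availability.foldl (fun d student_time =>
      student_time.foldl (fun d t => d.insert t (d.getD t 0 + 1)) d) PySem.Dict.empty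
  let scores := rankings.foldl pvAltStudentScores PySem.Dict.empty
  if n ≤ 0 then []
  else
    let candidates := (PySem.List.sorted counts.items (fun kv => kv.2) true).take n.toNat
    let common := (candidates.filter (fun kv => m ≤ kv.2)).map (fun kv => kv.1)
    PySem.List.sorted common (fun t => scores.getD t 0) true

-- ===== PRECONDITION & SPEC =====
def Spec_find_common_times (availability : List (List String)) (rankings : List (List String)) (n : Int) (m : Int) (out : List String) : Prop := out = find_common_times_alt availability rankings n m
instance (availability : List (List String)) (rankings : List (List String)) (n : Int) (m : Int) (out : List String) : Decidable (Spec_find_common_times availability rankings n m out) := by unfold Spec_find_common_times; infer_instance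

-- ===== CLAIM (what is proved, stated in full; the proofs are below) =====
def Claim_equal_find_common_times : Prop := ∀ (availability : List (List String)) (rankings : List (List String)) (n : Int) (m : Int), Dom_find_common_times availability rankings n m → Spec_find_common_times availability rankings n m (find_common_times availability rankings n m)

-- ===== LEMMAS AND PROOFS =====

-- the cumulative ranking score of a time t: over all students, 3 - (first position of t), if present
def pvScore (rankings : List (List String)) (t : String) : Int :=
  (rankings.map (fun sr => if sr.contains t then 3 - ((PySem.List.index? sr t).getD 0 : Int) else 0)).sum

lemma pv_foldl_append (L : List (List String)) (acc : List String) :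
    L.foldl (fun acc student_time => acc ++ student_time) acc = acc ++ L.flatten := by
  induction L generalizing acc with
  | nil => simp
  | cons x xs ih => simp [ih, List.append_assoc]

-- B's nested counting loop is Counter(flattened availability)
lemma pv_counts_eq (availability : List (List String)) :
    availability.foldl (fun d student_time =>
        student_time.foldl (fun d t => d.insert t (d.getD t 0 + 1)) d) PySem.Dict.empty
      = PySem.Dict.counter (availability.foldl (fun acc student_time => acc ++ student_time) []) := by
  rw [pv_foldl_append, List.nil_append, ← PySem.Dict.foldl_insert_getD_add_one_eq_counter,
    List.foldl_flatten]

-- A's inner loop over rankings only touches the key `time`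
lemma pv_innerA_ne (rankings : List (List String)) (d : PySem.Dict String Int) (t u : String) (h : u ≠ t) :
    (rankings.foldl (fun d student_rankings =>
        if student_rankings.contains t then
          d.insert t (d.getD t 0 + (3 - ((PySem.List.index? student_rankings t).getD 0 : Int)))
        else d) d).getD u 0 = d.getD u 0 := by
  induction rankings generalizing d with
  | nil => rfl
  | cons sr rs ih =>
      simp only [List.foldl_cons]
      split
      · rw [ih, PySem.Dict.getD_insert_of_ne _ _ _ h]
      · rw [ih]

lemma pv_innerA_self (rankings : List (List String)) (d : PySem.Dict String Int) (t : String) :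
    (rankings.foldl (fun d student_rankings =>
        if student_rankings.contains t then
          d.insert t (d.getD t 0 + (3 - ((PySem.List.index? student_rankings t).getD 0 : Int)))
        else d) d).getD t 0 = d.getD t 0 + pvScore rankings t := by
  induction rankings generalizing d with
  | nil => simp [pvScore]
  | cons sr rs ih =>
      simp only [List.foldl_cons, pvScore, List.map_cons, List.sum_cons]
      split
      · rw [ih, PySem.Dict.getD_insert_self]
        simp only [pvScore]; ring
      · rw [ih]; simp only [pvScore]; ring

lemma pv_outerA_pres (rankings : List (List String)) (cs : List String) (d : PySem.Dict String Int)
    (t : String) (h : t ∉ cs) :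
    (cs.foldl (fun d time =>
        rankings.foldl (fun d student_rankings =>
            if student_rankings.contains time then
              d.insert time (d.getD time 0 + (3 - ((PySem.List.index? student_rankings time).getD 0 : Int)))
            else d)
          (d.insert time 0)) d).getD t 0 = d.getD t 0 := by
  induction cs generalizing d with
  | nil => rfl
  | cons c cs ih =>
      simp only [List.mem_cons, not_or] at h
      simp only [List.foldl_cons]
      rw [ih _ h.2, pv_innerA_ne _ _ _ _ h.1, PySem.Dict.getD_insert_of_ne _ _ _ h.1]

lemma pv_outerA (rankings : List (List String)) (cs : List String) (d : PySem.Dict String Int)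
    (t : String) (h : t ∈ cs) :
    (cs.foldl (fun d time =>
        rankings.foldl (fun d student_rankings =>
            if student_rankings.contains time then
              d.insert time (d.getD time 0 + (3 - ((PySem.List.index? student_rankings time).getD 0 : Int)))
            else d)
          (d.insert time 0)) d).getD t 0 = pvScore rankings t := by
  induction cs generalizing d with
  | nil => cases h
  | cons c cs ih =>
      simp only [List.foldl_cons]
      by_cases hm : t ∈ cs
      · exact ih _ hm
      · have ht : t = c := ((List.mem_cons.mp h).resolve_right hm)
        subst ht
        rw [pv_outerA_pres _ _ _ _ hm, pv_innerA_self, PySem.Dict.getD_insert_self, zero_add]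

-- one student's pass in B adds 3 - (first index) to exactly the times it contains
lemma pv_set_add_contains_self (s : PySem.Set String) (x : String) :
    (s.add x).contains x = true := by
  simp [PySem.Set.add, PySem.Set.contains]
  split <;> simp_all

lemma pv_set_add_contains_ne (s : PySem.Set String) (x t : String) (h : t ≠ x) :
    (s.add x).contains t = s.contains t := by
  simp [PySem.Set.add, PySem.Set.contains]
  split <;> simp [h]

lemma pv_perStudent (sr : List String) (i : Int) (d : PySem.Dict String Int) (seen : PySem.Set String)
    (t : String) :
    ((PySem.List.enumerate sr i).foldl
        (fun (p : PySem.Dict String Int × PySem.Set String) it =>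
          if p.2.contains it.2 then p
          else (p.1.insert it.2 (p.1.getD it.2 0 + (3 - it.1)), p.2.add it.2))
        (d, seen)).1.getD t 0 =
      if seen.contains t = false ∧ t ∈ sr
      then d.getD t 0 + (3 - (i + ((PySem.List.index? sr t).getD 0 : Int)))
      else d.getD t 0 := by
  induction sr generalizing i d seen with
  | nil => simp [PySem.List.enumerate]
  | cons x xs ih =>
      rw [PySem.List.enumerate_cons]
      simp only [List.foldl_cons]
      by_cases hc : seen.contains x = true
      · simp only [hc, if_true]
        rw [ih]
        by_cases ht : t = x
        · subst ht
          have hmem : t ∈ seen := by simpa using hc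
          simp [hmem]
        · rw [PySem.List.index?_cons_of_ne _ (Ne.symm ht)]
          by_cases hm : t ∈ xs
          · obtain ⟨k, hk⟩ := Option.isSome_iff_exists.mp
              ((PySem.List.index?_isSome_iff xs t).mpr hm)
            simp only [hk, Option.map_some, Option.getD_some, List.mem_cons, ht, false_or, hm]
            split_ifs with h1
            · push_cast; ring_nf
            · rfl
          · simp [ht, hm]
      · simp only [Bool.not_eq_true] at hc
        simp only [hc, Bool.false_eq_true, if_false]
        rw [ih]
        by_cases ht : t = x
        · subst ht
          rw [pv_set_add_contains_self]
          simp only [Bool.true_eq_false, false_and, if_false, PySem.Dict.getD_insert_self,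
            PySem.List.index?_cons_self]
          have hnmem : t ∉ seen := by simpa using hc
          simp [hnmem]
        · rw [pv_set_add_contains_ne _ _ _ ht,
            PySem.Dict.getD_insert_of_ne _ _ _ ht,
            PySem.List.index?_cons_of_ne _ (Ne.symm ht)]
          by_cases hm : t ∈ xs
          · obtain ⟨k, hk⟩ := Option.isSome_iff_exists.mp
              ((PySem.List.index?_isSome_iff xs t).mpr hm)
            simp only [hk, Option.map_some, Option.getD_some, List.mem_cons, ht, false_or, hm]
            split_ifs with h1
            · push_cast; ring_nf
            · rfl
          · simp [ht, hm]

lemma pv_scores_getD (rankings : List (List String)) (d : PySem.Dict String Int) (t : String) :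
    (rankings.foldl pvAltStudentScores d).getD t 0 = d.getD t 0 + pvScore rankings t := by
  induction rankings generalizing d with
  | nil => simp [pvScore]
  | cons sr rs ih =>
      simp only [List.foldl_cons, pvScore, List.map_cons, List.sum_cons]
      rw [ih]
      have hps := pv_perStudent sr 0 d PySem.Set.empty t
      have hempty : (PySem.Set.empty : PySem.Set String).contains t = false := rfl
      rw [hempty] at hps
      unfold pvAltStudentScores
      rw [hps]
      by_cases hm : t ∈ sr
      · have hcont : sr.contains t = true := by simpa using hm
        simp only [hm, and_true, if_true, hcont, pvScore, zero_add]
        ring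
      · have hcont : sr.contains t = false := by simpa using hm
        simp only [hm, and_false, if_false, hcont, Bool.false_eq_true, pvScore]
        ring

lemma pv_insertBy_congr (b1 b2 : String → String → Bool) (x : String) (ys : List String)
    (h : ∀ y ∈ ys, b1 x y = b2 x y) :
    PySem.List.insertBy b1 x ys = PySem.List.insertBy b2 x ys := by
  induction ys with
  | nil => rfl
  | cons y ys ih =>
      simp only [PySem.List.insertBy]
      rw [h y (List.mem_cons_self ..)]
      split
      · rfl
      · rw [ih (fun z hz => h z (List.mem_cons_of_mem _ hz))]

lemma pv_foldl_insertBy_congr (k1 k2 : String → Int) (xs acc : List String)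
    (hxs : ∀ x ∈ xs, k1 x = k2 x) (hacc : ∀ x ∈ acc, k1 x = k2 x) :
    xs.foldl (fun acc x => PySem.List.insertBy (fun a b => decide (k1 b < k1 a)) x acc) acc
      = xs.foldl (fun acc x => PySem.List.insertBy (fun a b => decide (k2 b < k2 a)) x acc) acc := by
  induction xs generalizing acc with
  | nil => rfl
  | cons x xs ih =>
      simp only [List.foldl_cons]
      rw [pv_insertBy_congr _ (fun a b => decide (k2 b < k2 a)) x acc
        (fun y hy => by rw [hxs x (List.mem_cons_self ..), hacc y hy])]
      exact ih _ (fun z hz => hxs z (List.mem_cons_of_mem _ hz))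
        (fun z hz => by
          rcases (PySem.List.mem_insertBy _ _ _ _).mp hz with h | h
          · exact h ▸ hxs x (List.mem_cons_self ..)
          · exact hacc z h)

lemma pv_sorted_rev_congr (xs : List String) (k1 k2 : String → Int)
    (h : ∀ x ∈ xs, k1 x = k2 x) :
    PySem.List.sorted xs k1 true = PySem.List.sorted xs k2 true := by
  rw [PySem.List.sorted_rev_eq_foldl_insertBy, PySem.List.sorted_rev_eq_foldl_insertBy]
  exact pv_foldl_insertBy_congr k1 k2 xs [] h (by simp)

-- ===== VERDICT (by name: the statement is the Claim_ definition above) =====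
theorem find_common_times_spec : Claim_equal_find_common_times := by
  intro availability rankings n m _hdom
  unfold Spec_find_common_times find_common_times find_common_times_alt
  rw [pv_counts_eq]
  by_cases hn : n ≤ 0
  · simp [hn, PySem.List.slice, PySem.List.clampIdx]
    left; split_ifs <;> omega
  · simp only [hn, if_false]
    rw [pv_sorted_rev_congr _ _
      (fun t => (List.foldl pvAltStudentScores PySem.Dict.empty rankings).getD t 0)
      (fun t ht => by
        rw [pv_outerA rankings _ _ t ht]
        simp [pv_scores_getD])]
    rw [PySem.List.slice_to _ (by omega : (0:Int) ≤ n)]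
    refine List.take_of_length_le ?_
    rw [PySem.List.length_sorted, List.length_map]
    exact le_trans (List.length_filter_le _ _) (by simp)
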